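-- pv_equiv track=rewrite | github.com/urvesh254/30DaysOfCode-PhoenixClub | day-20-of-30/Adding 5 to Maximise Number/Python/urveshpatel.py | solveNegative
-- ===== SOURCE A (Python) =====
-- def solveNegative(n):
--     s = ""
--     n = str(n)[1:]
--     for i in range(len(n)):
--         if int(n[i]) <= 5:
--             s += n[i]
--         else:
--             s += "5" + n[i:]
--             break
--     if len(n) == len(s):
--         return "-" + s + "5"
--     else:
--         return "-" + s
-- ===== SOURCE B (Python) =====
-- def solveNegative(n):
--     digits = str(n)[1:]
--     best = min(digits[:i] + "5" + digits[i:] for i in range(len(digits) + 1))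
--     return "-" + best
-- ===== Notes on version B (the rewrite author's own statement) =====
-- stated objective: alternative
-- what changed: Replaces A's greedy left-to-right scan (copy digits while <=5, splice '5' before the first larger digit, special-case the fallthrough with a length test) by generating all len+1 insertion candidates and taking their lexicographic minimum; all candidates have equal length, so the lexicographic minimum is A's greedy choice.
import Mathlib
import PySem

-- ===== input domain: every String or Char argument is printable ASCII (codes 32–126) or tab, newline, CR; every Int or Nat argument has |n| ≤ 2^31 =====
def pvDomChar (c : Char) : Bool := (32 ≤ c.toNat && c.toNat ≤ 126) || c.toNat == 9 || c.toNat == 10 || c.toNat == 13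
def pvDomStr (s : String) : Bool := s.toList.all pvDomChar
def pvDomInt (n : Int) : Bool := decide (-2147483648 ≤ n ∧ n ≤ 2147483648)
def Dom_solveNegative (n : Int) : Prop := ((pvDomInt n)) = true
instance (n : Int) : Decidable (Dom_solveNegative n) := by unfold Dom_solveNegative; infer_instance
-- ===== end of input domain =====

-- B replaces A's greedy scan by enumerating all len+1 insertion candidates and taking
-- the lexicographic minimum (objective: alternative algorithm, same result).


-- ===== PORT A =====
-- int(c) for a single character: exact for the decimal digits '0'..'9', which are the
-- only characters str(n)[1:] can hold (position 0 is the only place a '-' can appear).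
def pvCharToInt (c : Char) : Int := (c.toNat : Int) - 48

-- the for-loop over n[i] building s, with the break ('5' + n[i:]) ending the recursion
def solveNegativeLoop : List Char → List Char
  | [] => []
  | c :: t => if pvCharToInt c ≤ 5 then c :: solveNegativeLoop t else '5' :: c :: t

def solveNegative (n : Int) : String :=
  let nd : List Char := PySem.List.slice (PySem.Int.toChars n) (some 1) none  -- str(n)[1:]
  let s := solveNegativeLoop nd
  if nd.length = s.length then String.mk ('-' :: (s ++ ['5'])) else String.mk ('-' :: s)

-- ===== PORT B =====
-- digits[:i] + "5" + digits[i:]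
def pvCandidate (ds : List Char) (i : Int) : String :=
  String.mk (PySem.List.slice ds none (some i) ++ '5' :: PySem.List.slice ds (some i) none)

def solveNegative_alt (n : Int) : String :=
  let ds : List Char := PySem.List.slice (PySem.Int.toChars n) (some 1) none  -- str(n)[1:]
  let cands := (PySem.List.pyRange 0 (PySem.List.len ds + 1) 1).map (pvCandidate ds)
  match PySem.List.min? cands (fun x => x) with
  | some m => String.mk ('-' :: m.toList)   -- "-" + min(cands)
  | none => ""                              -- unreachable: the candidate list is never empty

-- ===== PRECONDITION & SPEC =====
def Spec_solveNegative (n : Int) (out : String) : Prop := out = solveNegative_alt n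
instance (n : Int) (out : String) : Decidable (Spec_solveNegative n out) := by unfold Spec_solveNegative; infer_instance

-- ===== CLAIM (what is proved, stated in full; the proofs are below) =====
def Claim_equal_solveNegative : Prop := ∀ (n : Int), Dom_solveNegative n → Spec_solveNegative n (solveNegative n)

-- ===== LEMMAS AND PROOFS =====

-- A's whole digit computation: the loop followed by the length test, as one function
def pvG : List Char → List Char
  | [] => ['5']
  | c :: t => if c ≤ '5' then c :: pvG t else '5' :: c :: t

lemma pvCond_iff (c : Char) : (pvCharToInt c ≤ 5) ↔ c ≤ '5' := by
  have h5 : (c ≤ '5') ↔ c.toNat ≤ 53 := by rw [Char.le_def]; exact ge_iff_le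
  rw [h5]; unfold pvCharToInt; omega

lemma pvLoop_g (ds : List Char) :
    (if ds.length = (solveNegativeLoop ds).length then solveNegativeLoop ds ++ ['5']
     else solveNegativeLoop ds) = pvG ds := by
  induction ds with
  | nil => simp [solveNegativeLoop, pvG]
  | cons c t ih =>
    by_cases h : c ≤ '5'
    · have h' : pvCharToInt c ≤ 5 := (pvCond_iff c).mpr h
      simp only [solveNegativeLoop, pvG, h, h', if_true, List.length_cons,
        Nat.add_right_cancel_iff]
      split_ifs with hl
      · rw [if_pos hl] at ih; simp [← ih]
      · rw [if_neg hl] at ih; simp [← ih]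
    · have h' : ¬ pvCharToInt c ≤ 5 := fun hh => h ((pvCond_iff c).mp hh)
      simp only [solveNegativeLoop, pvG, h, h', if_false]
      simp

-- the greedy result is (lexicographically) ≤ every insertion candidate
lemma pvG_le (ds : List Char) : ∀ i : Nat,
    pvG ds = ds.take i ++ '5' :: ds.drop i ∨
    List.Lex (· < ·) (pvG ds) (ds.take i ++ '5' :: ds.drop i) := by
  induction ds with
  | nil => intro i; left; simp [pvG]
  | cons c t ih =>
    intro i
    cases i with
    | zero =>
      simp only [List.take_zero, List.drop_zero, List.nil_append]
      by_cases h : c ≤ '5'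
      · rcases lt_or_eq_of_le h with hlt | heq
        · right; simp only [pvG, h, if_true]; exact List.Lex.rel hlt
        · subst heq
          simp only [pvG, if_pos le_rfl]
          rcases ih 0 with he | hl
          · left; simp at he; simp [he]
          · right; simp at hl; exact List.Lex.cons hl
      · left; simp [pvG, h]
    | succ j =>
      simp only [List.take_succ_cons, List.drop_succ_cons, List.cons_append]
      by_cases h : c ≤ '5'
      · simp only [pvG, h, if_true]
        rcases ih j with he | hl
        · left; rw [he]
        · right; exact List.Lex.cons hl
      · right
        simp only [pvG, h, if_false]
        exact List.Lex.rel (not_le.mp h)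

-- the greedy result IS one of the candidates
lemma pvG_mem (ds : List Char) :
    ∃ i : Nat, i ≤ ds.length ∧ pvG ds = ds.take i ++ '5' :: ds.drop i := by
  induction ds with
  | nil => exact ⟨0, by simp, by simp [pvG]⟩
  | cons c t ih =>
    by_cases h : c ≤ '5'
    · obtain ⟨i, hle, heq⟩ := ih
      exact ⟨i + 1, by simpa using Nat.succ_le_succ hle, by simp [pvG, h, heq]⟩
    · exact ⟨0, by simp, by simp [pvG, h]⟩

lemma pvToList_mk (l : List Char) : (String.mk l).toList = l :=
  Eq.symm (String.ofList_eq.mp rfl)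

lemma pvMk_le_mk {l m : List Char} (h : l = m ∨ List.Lex (· < ·) l m) :
    String.mk l ≤ String.mk m := by
  rcases h with rfl | h
  · exact le_refl _
  · exact le_of_lt (String.lt_iff_toList_lt.mpr (by rw [pvToList_mk, pvToList_mk]; exact h))

lemma pvCands_eq (ds : List Char) :
    (PySem.List.pyRange 0 (PySem.List.len ds + 1) 1).map (pvCandidate ds)
      = (List.range (ds.length + 1)).map (fun k => String.mk (ds.take k ++ '5' :: ds.drop k)) := by
  rw [PySem.List.pyRange_one]
  have hn : ((PySem.List.len ds + 1 - 0).toNat) = ds.length + 1 := by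
    simp [PySem.List.len_eq]
  rw [hn, List.map_map]
  apply List.map_congr_left
  intro k _
  simp [pvCandidate, PySem.List.slice_to_natCast, PySem.List.slice_from_natCast]

lemma pvMin_eq (ds : List Char) :
    PySem.List.min? ((PySem.List.pyRange 0 (PySem.List.len ds + 1) 1).map (pvCandidate ds))
      (fun x => x) = some (String.mk (pvG ds)) := by
  rw [pvCands_eq]
  set cands := (List.range (ds.length + 1)).map
      (fun k => String.mk (ds.take k ++ '5' :: ds.drop k)) with hc
  have hgmem : String.mk (pvG ds) ∈ cands := by
    obtain ⟨i, hle, heq⟩ := pvG_mem ds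
    rw [hc]
    exact List.mem_map.mpr ⟨i, List.mem_range.mpr (Nat.lt_succ_of_le hle), by rw [heq]⟩
  have hgle : ∀ y ∈ cands, String.mk (pvG ds) ≤ y := by
    intro y hy
    rw [hc] at hy
    obtain ⟨k, _, rfl⟩ := List.mem_map.mp hy
    exact pvMk_le_mk (pvG_le ds k)
  have hne : cands ≠ [] := by simp [hc]
  cases hmo : PySem.List.min? cands (fun x => x) with
  | none => exact absurd ((PySem.List.min?_eq_none_iff _ _).mp hmo) hne
  | some m =>
    have hmem := PySem.List.min?_mem hmo
    have hmin := PySem.List.min?_isMin hmo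
    have : m = String.mk (pvG ds) :=
      le_antisymm (hmin _ hgmem) (hgle m hmem)
    rw [this]

-- ===== VERDICT (by name: the statement is the Claim_ definition above) =====
theorem solveNegative_spec : Claim_equal_solveNegative := by
  intro n _
  show solveNegative n = solveNegative_alt n
  simp only [solveNegative, solveNegative_alt]
  set ds : List Char := PySem.List.slice (PySem.Int.toChars n) (some 1) none with hds
  rw [pvMin_eq ds]
  have hA := pvLoop_g ds
  split_ifs with h
  · rw [if_pos h] at hA; show _ = String.mk ('-' :: (String.mk (pvG ds)).toList)
    rw [pvToList_mk, hA]
  · rw [if_neg h] at hA; show _ = String.mk ('-' :: (String.mk (pvG ds)).toList)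
    rw [pvToList_mk, hA]
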